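-- pv_equiv track=rewrite | github.com/AVUKU-PRAGATHESWARI/GeeksForGeeks | Unique Number of Occurrences.py | isFrequencyUnique
-- ===== SOURCE A (Python) =====
-- from typing import List
--
-- def isFrequencyUnique(n : int, arr : List[int]) -> bool:
--     result=[]
--     setofarr=list(set(arr))
--     for i in setofarr:
--         count=arr.count(i)
--         if count in result:
--             return False
--         else:
--             result.append(count)
--     return True
-- ===== SOURCE B (Python) =====
-- from typing import List
--
-- def isFrequencyUnique(n : int, arr : List[int]) -> bool:
--     freq = {}
--     for x in arr:
--         freq[x] = freq.get(x, 0) + 1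
--     prev = None
--     for c in sorted(freq.values()):
--         if c == prev:
--             return False
--         prev = c
--     return True
-- ===== Notes on version B (the rewrite author's own statement) =====
-- stated objective: alternative
-- what changed: Replaces A's per-distinct-element arr.count scan plus linear membership test in a seen-list with a single-pass frequency dict followed by sorting the counts and one adjacent-duplicate scan; it trades A's C-level count/membership scans for a sort-then-scan duplicate detection.
import Mathlib
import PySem

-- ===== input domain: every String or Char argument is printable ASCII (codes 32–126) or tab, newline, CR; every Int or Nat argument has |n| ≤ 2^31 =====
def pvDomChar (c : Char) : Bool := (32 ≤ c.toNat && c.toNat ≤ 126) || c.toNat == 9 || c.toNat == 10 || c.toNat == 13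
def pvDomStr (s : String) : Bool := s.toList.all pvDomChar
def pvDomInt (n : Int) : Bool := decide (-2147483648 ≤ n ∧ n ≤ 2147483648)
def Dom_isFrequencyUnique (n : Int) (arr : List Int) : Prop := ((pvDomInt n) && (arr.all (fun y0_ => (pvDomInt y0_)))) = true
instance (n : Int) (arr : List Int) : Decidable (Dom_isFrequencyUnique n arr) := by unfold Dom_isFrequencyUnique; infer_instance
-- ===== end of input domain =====

-- B replaces A's seen-list/arr.count strategy by a frequency dict built in one pass
-- plus a sort of the counts and a single adjacent-duplicate scan (objective: alternative).

-- ===== PORT A =====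
-- the 'for i in setofarr' loop; result is the accumulated list of seen counts
def pvLoopA (arr : List Int) : List Int → List Int → Bool
  | [], _ => true
  | i :: rest, result =>
    let count : Int := (PySem.List.count arr i : Int)
    if result.contains count then false
    else pvLoopA arr rest (result ++ [count])

def isFrequencyUnique (n : Int) (arr : List Int) : Bool :=
  pvLoopA arr (PySem.Set.ofList arr) []

-- ===== PORT B =====
-- the 'for c in sorted(freq.values())' loop; prev = None ↦ none
def pvLoopB : List Int → Option Int → Bool
  | [], _ => true
  | c :: t, prev => if (some c == prev) then false else pvLoopB t (some c)

def isFrequencyUnique_alt (n : Int) (arr : List Int) : Bool :=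
  let freq : PySem.Dict Int Int :=
    arr.foldl (fun d x => d.insert x (d.getD x 0 + 1)) PySem.Dict.empty
  pvLoopB (PySem.List.sorted freq.values (fun c => c)) none

-- ===== PRECONDITION & SPEC =====
def Spec_isFrequencyUnique (n : Int) (arr : List Int) (out : Bool) : Prop := out = isFrequencyUnique_alt n arr
instance (n : Int) (arr : List Int) (out : Bool) : Decidable (Spec_isFrequencyUnique n arr out) := by unfold Spec_isFrequencyUnique; infer_instance

-- ===== CLAIM (what is proved, stated in full; the proofs are below) =====
def Claim_equal_isFrequencyUnique : Prop := ∀ (n : Int) (arr : List Int), Dom_isFrequencyUnique n arr → Spec_isFrequencyUnique n arr (isFrequencyUnique n arr)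

-- ===== LEMMAS AND PROOFS =====

-- A's loop succeeds iff the seen counts together with the remaining counts are all distinct
theorem pvLoopA_eq (arr : List Int) (l res : List Int) (hres : res.Nodup) :
    pvLoopA arr l res = true ↔ (res ++ l.map (fun i => (PySem.List.count arr i : Int))).Nodup := by
  induction l generalizing res with
  | nil => simp [pvLoopA, hres]
  | cons i rest ih =>
    simp only [pvLoopA, List.map_cons]
    by_cases hc : ((PySem.List.count arr i : Int)) ∈ res
    · rw [if_pos (by simpa using hc)]
      constructor
      · intro h; cases h
      · intro h
        exact ((List.nodup_append.mp h).2.2 _ hc _ (by simp) rfl).elim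
    · rw [if_neg (by simpa using hc)]
      have hres' : (res ++ [(PySem.List.count arr i : Int)]).Nodup := by
        rw [List.nodup_append]
        refine ⟨hres, List.nodup_singleton _, ?_⟩
        intro a ha b hb e
        rw [List.mem_singleton] at hb
        exact hc ((e.trans hb) ▸ ha)
      rw [ih _ hres']
      simp [List.append_assoc]

theorem pvLoopB_some_eq (p : Int) (cs : List Int) (hs : (p :: cs).Pairwise (· ≤ ·)) :
    pvLoopB cs (some p) = true ↔ (p :: cs).Nodup := by
  induction cs generalizing p with
  | nil => simp [pvLoopB]
  | cons c t ih =>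
    simp only [pvLoopB]
    by_cases hcp : c = p
    · subst hcp
      simp
    · have hne : (some c == some p) = false := by simp [hcp]
      rw [hne, if_neg (by simp)]
      have hs' : (c :: t).Pairwise (· ≤ ·) := hs.tail
      rw [ih c hs']
      have hpc : p ≤ c := (List.pairwise_cons.mp hs).1 c (by simp)
      have hpt : ∀ x ∈ t, p ≤ x := fun x hx => (List.pairwise_cons.mp hs).1 x (by simp [hx])
      have hct : ∀ x ∈ t, c ≤ x := fun x hx => (List.pairwise_cons.mp hs').1 x hx
      constructor
      · intro h
        refine List.nodup_cons.mpr ⟨?_, h⟩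
        intro hmem
        rcases List.mem_cons.mp hmem with h1 | h1
        · exact hcp h1.symm
        · exact hcp (le_antisymm (hct p h1) hpc)
      · intro h
        exact (List.nodup_cons.mp h).2

theorem pvLoopB_none_eq (cs : List Int) (hs : cs.Pairwise (· ≤ ·)) :
    pvLoopB cs none = true ↔ cs.Nodup := by
  cases cs with
  | nil => simp [pvLoopB]
  | cons c t =>
    simp only [pvLoopB]
    rw [if_neg (by simp)]
    exact pvLoopB_some_eq c t hs

-- ===== VERDICT (by name: the statement is the Claim_ definition above) =====
theorem isFrequencyUnique_spec : Claim_equal_isFrequencyUnique := by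
  intro n arr _
  unfold Spec_isFrequencyUnique isFrequencyUnique isFrequencyUnique_alt
  have hvals : (arr.foldl (fun d x => d.insert x (d.getD x 0 + 1)) PySem.Dict.empty).values
      = (PySem.Set.ofList arr).map (fun i => (PySem.List.count arr i : Int)) := by
    rw [PySem.Dict.foldl_insert_getD_add_one_eq_counter]
    show (PySem.Dict.counter arr).items.map (·.2) = _
    rw [PySem.Dict.items_counter]
    simp [PySem.List.count]
  simp only [hvals]
  rw [Bool.eq_iff_iff]
  rw [pvLoopA_eq arr _ [] (by simp),
      pvLoopB_none_eq _ (by simpa using PySem.List.sorted_pairwise _ (fun c => c))]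
  simp only [List.nil_append]
  exact ((PySem.List.sorted_perm _ (fun c => c) false).nodup_iff).symm
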